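-- pv_equiv track=rewrite | github.com/Ragnww/Ejercicios-Funciones | Ejercicio6.py | funtemperaturas
-- ===== SOURCE A (Python) =====
-- def funtemperaturas(datos):
--     ciudad_max = ""
--     ciudad_min = ""
--     temp_max = None
--     temp_min = None
--
--     for ciudad in datos:
--         for temp in datos[ciudad]:
--             if temp_max is None or temp > temp_max:
--                 temp_max = temp
--                 ciudad_max = ciudad
--             if temp_min is None or temp < temp_min:
--                 temp_min = temp
--                 ciudad_min = ciudad
--
--     return (ciudad_max, temp_max), (ciudad_min, temp_min)
-- ===== SOURCE B (Python) =====
-- def funtemperaturas(datos):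
--     pares = [(ciudad, temp) for ciudad in datos for temp in datos[ciudad]]
--     if not pares:
--         return ("", None), ("", None)
--     cmax = max(pares, key=lambda p: p[1])
--     cmin = min(pares, key=lambda p: p[1])
--     return (cmax[0], cmax[1]), (cmin[0], cmin[1])
-- ===== Notes on version B (the rewrite author's own statement) =====
-- stated objective: idiomatic
-- what changed: Replaces the manual nested scan carrying four mutable variables with a flattened (city, temp) table and two built-in max/min reductions with a key, relying on max/min returning the first extremal element to match A's strict-comparison tie-breaking.
-- outside the precondition, e.g. on funtemperaturas({}): A returns (('', None), ('', None)), B returns (('', None), ('', None))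
import Mathlib
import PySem

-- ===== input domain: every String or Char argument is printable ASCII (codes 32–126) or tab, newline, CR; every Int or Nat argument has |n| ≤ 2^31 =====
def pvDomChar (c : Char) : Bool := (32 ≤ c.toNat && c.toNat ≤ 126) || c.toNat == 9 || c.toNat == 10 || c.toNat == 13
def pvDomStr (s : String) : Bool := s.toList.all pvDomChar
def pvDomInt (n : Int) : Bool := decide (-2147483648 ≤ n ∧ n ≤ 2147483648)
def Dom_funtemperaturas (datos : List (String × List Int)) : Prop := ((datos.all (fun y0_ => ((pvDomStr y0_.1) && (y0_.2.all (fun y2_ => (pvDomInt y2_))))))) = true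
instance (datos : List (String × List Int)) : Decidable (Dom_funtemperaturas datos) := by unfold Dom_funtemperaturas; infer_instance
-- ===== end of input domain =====

-- B replaces A's manual four-variable nested scan with a flattened (city, temp) table and two
-- first-extremal max/min reductions (idiomatic; same cost). Return-value equivalence only.

-- ===== PORT A =====
-- dict keys are unique, so Python's 'for ciudad in datos: for temp in datos[ciudad]'
-- visits exactly the items of the dict in insertion order; the fold state is
-- (ciudad_max, ciudad_min, temp_max, temp_min) with the temps as Options (None = Python None).
def funtemperaturas (datos : List (String × List Int)) : (String × Int) × (String × Int) :=
  let st := datos.foldl (fun st pr =>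
      pr.2.foldl (fun st temp =>
        let s1 : String × Option Int :=
          match st.2.2.1 with
          | none => (pr.1, some temp)
          | some m => if m < temp then (pr.1, some temp) else (st.1, some m)
        let s2 : String × Option Int :=
          match st.2.2.2 with
          | none => (pr.1, some temp)
          | some m => if temp < m then (pr.1, some temp) else (st.2.1, some m)
        (s1.1, s2.1, s1.2, s2.2)) st)
    ("", "", (none : Option Int), (none : Option Int))
  -- outside Pre_ Python A returns None for the temperatures (not an Int); 0 is a placeholder there
  ((st.1, st.2.2.1.getD 0), (st.2.1, st.2.2.2.getD 0))

-- ===== PORT B =====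
def funtemperaturas_alt (datos : List (String × List Int)) : (String × Int) × (String × Int) :=
  let pares := datos.flatMap (fun p => p.2.map (fun t => (p.1, t)))
  match PySem.List.max? pares (fun q => q.2), PySem.List.min? pares (fun q => q.2) with
  | some cmax, some cmin => ((cmax.1, cmax.2), (cmin.1, cmin.2))
  | _, _ => (("", 0), ("", 0))   -- outside Pre_ (no temperature at all) Python B returns ("", None) twice

-- ===== PRECONDITION & SPEC =====
-- Pre_ excludes inputs with no temperature at all (empty dict or all lists empty): there Python A
-- returns (("", None), ("", None)), i.e. None where the declared Int is expected.
def Pre_funtemperaturas (datos : List (String × List Int)) : Prop :=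
  (datos.any (fun p => !p.2.isEmpty)) = true
instance (datos : List (String × List Int)) : Decidable (Pre_funtemperaturas datos) := by unfold Pre_funtemperaturas; infer_instance
def pvWitness_funtemperaturas : (List (String × List Int)) := [("a", [1, -2])]

def Spec_funtemperaturas (datos : List (String × List Int)) (out : (String × Int) × (String × Int)) : Prop := out = funtemperaturas_alt datos
instance (datos : List (String × List Int)) (out : (String × Int) × (String × Int)) : Decidable (Spec_funtemperaturas datos out) := by unfold Spec_funtemperaturas; infer_instance

-- ===== CLAIM (what is proved, stated in full; the proofs are below) =====
def Claim_equal_funtemperaturas : Prop := ∀ (datos : List (String × List Int)), Dom_funtemperaturas datos → Pre_funtemperaturas datos → Spec_funtemperaturas datos (funtemperaturas datos)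

-- ===== LEMMAS AND PROOFS =====

-- one step of the first-maximum / first-minimum reductions on (city, temp) pairs
def pvMax (o : Option (String × Int)) (p : String × Int) : Option (String × Int) :=
  match o with | none => some p | some m => if m.2 < p.2 then some p else some m
def pvMin (o : Option (String × Int)) (p : String × Int) : Option (String × Int) :=
  match o with | none => some p | some m => if p.2 < m.2 then some p else some m

-- one step of A's loop body, on a flattened (city, temp) pair
def pvStep (st : String × String × Option Int × Option Int) (p : String × Int) :
    String × String × Option Int × Option Int :=
  let s1 : String × Option Int :=
    match st.2.2.1 with
    | none => (p.1, some p.2)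
    | some m => if m < p.2 then (p.1, some p.2) else (st.1, some m)
  let s2 : String × Option Int :=
    match st.2.2.2 with
    | none => (p.1, some p.2)
    | some m => if p.2 < m then (p.1, some p.2) else (st.2.1, some m)
  (s1.1, s2.1, s1.2, s2.2)

def pvEnc (a b : Option (String × Int)) : String × String × Option Int × Option Int :=
  (a.elim "" (·.1), b.elim "" (·.1), a.map (·.2), b.map (·.2))

theorem pvStep_enc (a b : Option (String × Int)) (p : String × Int) :
    pvStep (pvEnc a b) p = pvEnc (pvMax a p) (pvMin b p) := by
  cases a <;> cases b <;> simp [pvStep, pvEnc, pvMax, pvMin] <;> split_ifs <;> simp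

theorem pvFold_enc (xs : List (String × Int)) (a b : Option (String × Int)) :
    xs.foldl pvStep (pvEnc a b) = pvEnc (xs.foldl pvMax a) (xs.foldl pvMin b) := by
  induction xs generalizing a b with
  | nil => rfl
  | cons x t ih => simp only [List.foldl_cons, pvStep_enc, ih]

theorem pvFoldl_flatMap {α β γ : Type} (g : β → List α) (f : γ → α → γ) (l : List β) (init : γ) :
    (l.flatMap g).foldl f init = l.foldl (fun st p => (g p).foldl f st) init := by
  induction l generalizing init with
  | nil => rfl
  | cons x t ih => simp [List.flatMap_cons, List.foldl_append, ih]

-- A's nested loop, rewritten over the flattened pair list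
theorem funA_flat (datos : List (String × List Int)) :
    funtemperaturas datos =
      (let st := (datos.flatMap (fun p => p.2.map (fun t => (p.1, t)))).foldl pvStep
          ("", "", (none : Option Int), (none : Option Int))
       ((st.1, st.2.2.1.getD 0), (st.2.1, st.2.2.2.getD 0))) := by
  simp only [funtemperaturas, pvFoldl_flatMap, List.foldl_map]
  rfl

theorem funtemperaturas_spec' (datos : List (String × List Int)) :
    funtemperaturas datos = funtemperaturas_alt datos := by
  rw [funA_flat]
  show (let st := (datos.flatMap (fun p => p.2.map (fun t => (p.1, t)))).foldl pvStep (pvEnc none none)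
        ((st.1, st.2.2.1.getD 0), (st.2.1, st.2.2.2.getD 0))) = _
  rw [pvFold_enc]
  cases h : datos.flatMap (fun p => p.2.map (fun t => (p.1, t))) with
  | nil => simp [funtemperaturas_alt, h, pvEnc, PySem.List.max?, PySem.List.min?]
  | cons x t =>
    have hmax : (x :: t).foldl pvMax none = t.foldl pvMax (some x) := rfl
    have hmin : (x :: t).foldl pvMin none = t.foldl pvMin (some x) := rfl
    have hsomeMax : ∀ (u : List (String × Int)) (a : String × Int), ∃ y, u.foldl pvMax (some a) = some y := by
      intro u
      induction u with
      | nil => exact fun a => ⟨a, rfl⟩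
      | cons z w ih =>
        intro a
        simp only [List.foldl_cons, pvMax]
        split_ifs <;> exact ih _
    have hsomeMin : ∀ (u : List (String × Int)) (a : String × Int), ∃ y, u.foldl pvMin (some a) = some y := by
      intro u
      induction u with
      | nil => exact fun a => ⟨a, rfl⟩
      | cons z w ih =>
        intro a
        simp only [List.foldl_cons, pvMin]
        split_ifs <;> exact ih _
    obtain ⟨ymax, hy⟩ := hsomeMax t x
    obtain ⟨ymin, hz⟩ := hsomeMin t x
    have hMfold : PySem.List.max? (x :: t) (fun q : String × Int => q.2) = (x :: t).foldl pvMax none := by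
      simp only [PySem.List.max?]
      congr 1
      funext acc p
      cases acc <;> rfl
    have hmfold : PySem.List.min? (x :: t) (fun q : String × Int => q.2) = (x :: t).foldl pvMin none := by
      simp only [PySem.List.min?]
      congr 1
      funext acc p
      cases acc <;> rfl
    have hM : PySem.List.max? (x :: t) (fun q : String × Int => q.2) = some ymax := by
      rw [hMfold, hmax, hy]
    have hm : PySem.List.min? (x :: t) (fun q : String × Int => q.2) = some ymin := by
      rw [hmfold, hmin, hz]
    simp [funtemperaturas_alt, h, hmax, hmin, hy, hz, hM, hm, pvEnc]

-- ===== VERDICT (by name: the statement is the Claim_ definition above) =====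
theorem funtemperaturas_spec : Claim_equal_funtemperaturas := by
  intro datos _ _
  exact funtemperaturas_spec' datos
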